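-- pv_equiv track=rewrite | github.com/Jmeigs1/advent-of-code | 2023/05/python/part2.py | eval_seed_maps
-- ===== SOURCE A (Python) =====
-- def eval_seed_maps(target, depth, seed_maps):
--     if len(seed_maps) == 0:
--         return target
--     else:
--         current_map = seed_maps[-1]
--         rest = seed_maps[:-1]
--         new_target = target
--
--         for part in current_map:
--             start_source, start_target, remap_range = part
--
--             if start_target <= target <= start_target + remap_range:
--                 new_target = start_source + (target - start_target)
--                 break
--
--         end_value = eval_seed_maps(new_target, depth + 1, rest)
--         return end_value
-- ===== SOURCE B (Python) =====
-- def eval_seed_maps(target, depth, seed_maps):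
--     value = target
--     for current_map in reversed(seed_maps):
--         for part in current_map:
--             start_source, start_target, remap_range = part
--             if start_target <= value <= start_target + remap_range:
--                 value = start_source + (value - start_target)
--                 break
--     return value
-- ===== Notes on version B (the rewrite author's own statement) =====
-- stated objective: simpler
-- what changed: Replaces the recursion (which slices off the last layer and recurses on the rest, copying the list at every level) with a single iterative loop over reversed(seed_maps), threading one accumulator value; the unused depth parameter is kept but ignored.
import Mathlib
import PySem

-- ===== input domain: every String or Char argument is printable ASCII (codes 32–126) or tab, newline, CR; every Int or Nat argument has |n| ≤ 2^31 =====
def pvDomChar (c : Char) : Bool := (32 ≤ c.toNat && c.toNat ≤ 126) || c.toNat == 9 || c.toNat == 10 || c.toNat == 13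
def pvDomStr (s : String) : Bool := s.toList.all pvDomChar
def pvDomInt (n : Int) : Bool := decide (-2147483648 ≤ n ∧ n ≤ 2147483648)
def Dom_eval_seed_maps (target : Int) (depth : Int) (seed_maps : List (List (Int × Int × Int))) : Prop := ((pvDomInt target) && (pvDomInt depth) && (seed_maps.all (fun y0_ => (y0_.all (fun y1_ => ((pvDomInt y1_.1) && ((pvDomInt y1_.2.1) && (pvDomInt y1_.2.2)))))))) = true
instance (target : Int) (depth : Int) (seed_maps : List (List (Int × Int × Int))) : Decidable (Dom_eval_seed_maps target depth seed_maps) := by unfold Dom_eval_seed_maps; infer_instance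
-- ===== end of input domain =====

-- B replaces A's recursion (slice off the last layer, recurse on the rest) with one
-- iterative fold over the reversed layer list; the unused depth parameter is ignored. Objective: simpler.

-- ===== PORT A =====
-- A's inner `for part in current_map: if …: new_target = …; break` (new_target starts as target)
def evalPartsA (target : Int) (parts : List (Int × Int × Int)) : Int :=
  match parts with
  | [] => target
  | (start_source, start_target, remap_range) :: rest =>
    if start_target ≤ target ∧ target ≤ start_target + remap_range then
      start_source + (target - start_target)
    else evalPartsA target rest

def eval_seed_maps (target : Int) (depth : Int) (seed_maps : List (List (Int × Int × Int))) : Int :=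
  if _h : seed_maps.length = 0 then target
  else
    let current_map := (PySem.List.pyGet? seed_maps (-1)).getD []   -- seed_maps[-1]; list nonempty so get succeeds
    let rest := PySem.List.slice seed_maps none (some (-1))          -- seed_maps[:-1]
    let new_target := evalPartsA target current_map
    eval_seed_maps new_target (depth + 1) rest
termination_by seed_maps.length
decreasing_by
  simp [PySem.List.slice_to_neg_one]
  cases seed_maps with
  | nil => simp at _h
  | cons a l => simp

-- ===== PORT B =====
-- B's inner loop is textually the same scan-with-break as A's
def evalPartsB (value : Int) (parts : List (Int × Int × Int)) : Int :=
  match parts with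
  | [] => value
  | (start_source, start_target, remap_range) :: rest =>
    if start_target ≤ value ∧ value ≤ start_target + remap_range then
      start_source + (value - start_target)
    else evalPartsB value rest

def eval_seed_maps_alt (target : Int) (_depth : Int) (seed_maps : List (List (Int × Int × Int))) : Int :=
  seed_maps.reverse.foldl evalPartsB target

-- ===== PRECONDITION & SPEC =====
def Spec_eval_seed_maps (target : Int) (depth : Int) (seed_maps : List (List (Int × Int × Int))) (out : Int) : Prop := out = eval_seed_maps_alt target depth seed_maps
instance (target : Int) (depth : Int) (seed_maps : List (List (Int × Int × Int))) (out : Int) : Decidable (Spec_eval_seed_maps target depth seed_maps out) := by unfold Spec_eval_seed_maps; infer_instance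

-- ===== CLAIM (what is proved, stated in full; the proofs are below) =====
def Claim_equal_eval_seed_maps : Prop := ∀ (target : Int) (depth : Int) (seed_maps : List (List (Int × Int × Int))), Dom_eval_seed_maps target depth seed_maps → Spec_eval_seed_maps target depth seed_maps (eval_seed_maps target depth seed_maps)

-- ===== LEMMAS AND PROOFS =====

-- ===== VERDICT (by name: the statement is the Claim_ definition above) =====
theorem evalParts_eq (t : Int) (ps : List (Int × Int × Int)) : evalPartsA t ps = evalPartsB t ps := by
  induction ps with
  | nil => rfl
  | cons p rest ih =>
    obtain ⟨a, b, c⟩ := p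
    simp only [evalPartsA, evalPartsB]
    split <;> simp [ih]

theorem eval_eq (seed_maps : List (List (Int × Int × Int))) :
    ∀ (t d : Int), eval_seed_maps t d seed_maps = eval_seed_maps_alt t d seed_maps := by
  induction seed_maps using List.reverseRecOn with
  | nil => intro t d; simp [eval_seed_maps, eval_seed_maps_alt]
  | append_singleton l x ih =>
    intro t d
    rw [eval_seed_maps]
    simp only [List.length_append, List.length_singleton]
    rw [dif_neg (by omega)]
    simp only [PySem.List.slice_to_neg_one, List.dropLast_concat]
    have hget : (PySem.List.pyGet? (l ++ [x]) (-1)).getD [] = x := by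
      simp [PySem.List.pyGet?, PySem.List.pyIdx?]
    rw [hget, ih]
    simp only [eval_seed_maps_alt, List.reverse_append, List.reverse_singleton,
      List.singleton_append, List.foldl_cons, evalParts_eq]

theorem eval_seed_maps_spec : Claim_equal_eval_seed_maps := by
  intro t d sms _
  unfold Spec_eval_seed_maps
  exact eval_eq sms t d
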